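-- pv_equiv track=rewrite | github.com/mintpancake/py_learning | tiny_programs/natakto.py | ai_transform
-- ===== SOURCE A (Python) =====
-- def ai_transform_rotate(trial_board):
--     all_rotated_boards=[]
--     temp_board=trial_board[:]
--     for _ in range(3):
--         rotated_board=trial_board[:]
--         rotated_board[0]=temp_board[6]
--         rotated_board[1]=temp_board[3]
--         rotated_board[2]=temp_board[0]
--         rotated_board[3]=temp_board[7]
--         rotated_board[5]=temp_board[1]
--         rotated_board[6]=temp_board[8]
--         rotated_board[7]=temp_board[5]
--         rotated_board[8]=temp_board[2]
--         temp_board=rotated_board[:]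
--         for i in range(9):
--             if temp_board[i]!='X':
--                 temp_board[i]=str(i)
--         all_rotated_boards.append(temp_board)
--     return all_rotated_boards
--
-- def ai_transform_reflect(trial_board):
--     all_reflected_boards=[]
--     reflected_board=trial_board[:]
--     reflected_board[0]=trial_board[6]
--     reflected_board[1]=trial_board[7]
--     reflected_board[2]=trial_board[8]
--     reflected_board[6]=trial_board[0]
--     reflected_board[7]=trial_board[1]
--     reflected_board[8]=trial_board[2]
--     for i in range(9):
--         if reflected_board[i] != 'X':
--             reflected_board[i]=str(i)
--     all_reflected_boards.append(reflected_board)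
--     reflected_board=trial_board[:]
--     reflected_board[0]=trial_board[2]
--     reflected_board[2]=trial_board[0]
--     reflected_board[3]=trial_board[5]
--     reflected_board[5]=trial_board[3]
--     reflected_board[6]=trial_board[8]
--     reflected_board[8]=trial_board[6]
--     for i in range(9):
--         if reflected_board[i] != 'X':
--             reflected_board[i]=str(i)
--     all_reflected_boards.append(reflected_board)
--     reflected_board=trial_board[:]
--     reflected_board[1]=trial_board[3]
--     reflected_board[3]=trial_board[1]
--     reflected_board[5]=trial_board[7]
--     reflected_board[7]=trial_board[5]
--     reflected_board[2]=trial_board[6]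
--     reflected_board[6]=trial_board[2]
--     for i in range(9):
--         if reflected_board[i] != 'X':
--             reflected_board[i]=str(i)
--     all_reflected_boards.append(reflected_board)
--     reflected_board=trial_board[:]
--     reflected_board[0]=trial_board[8]
--     reflected_board[8]=trial_board[0]
--     reflected_board[1]=trial_board[5]
--     reflected_board[5]=trial_board[1]
--     reflected_board[3]=trial_board[7]
--     reflected_board[7]=trial_board[3]
--     for i in range(9):
--         if reflected_board[i] != 'X':
--             reflected_board[i]=str(i)
--     all_reflected_boards.append(reflected_board)
--     return all_reflected_boards
--
-- def ai_transform(trial_board):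
--     all_transformed_boards=[trial_board]
--     for i in ai_transform_rotate(trial_board):
--         if i not in all_transformed_boards:
--             all_transformed_boards.append(i)
--     for i in ai_transform_reflect(trial_board):
--         if i not in all_transformed_boards:
--             all_transformed_boards.append(i)
--     return all_transformed_boards
-- ===== SOURCE B (Python) =====
-- # Table-driven: each of the 7 symmetries of the 3x3 grid is an index permutation.
-- # For each one, copy the board, overwrite cell j with 'X' or its label str(j)
-- # according to the source cell, and keep the image only if it is new.
-- _PERMS = [
--     [6, 3, 0, 7, 4, 1, 8, 5, 2],   # rot90
--     [8, 7, 6, 5, 4, 3, 2, 1, 0],   # rot180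
--     [2, 5, 8, 1, 4, 7, 0, 3, 6],   # rot270
--     [6, 7, 8, 3, 4, 5, 0, 1, 2],   # horizontal-axis reflection
--     [2, 1, 0, 5, 4, 3, 8, 7, 6],   # vertical-axis reflection
--     [0, 3, 6, 1, 4, 7, 2, 5, 8],   # main-diagonal reflection
--     [8, 5, 2, 7, 4, 1, 6, 3, 0],   # anti-diagonal reflection
-- ]
--
-- def ai_transform(trial_board):
--     boards = [trial_board]
--     for p in _PERMS:
--         img = trial_board[:]
--         for j, src in enumerate(p):
--             img[j] = 'X' if trial_board[src] == 'X' else str(j)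
--         if img not in boards:
--             boards.append(img)
--     return boards
-- ===== Notes on version B (the rewrite author's own statement) =====
-- stated objective: simpler
-- what changed: Replaces A's cumulative rotate chain (each rotation feeding the next normalized board) and four hand-unrolled reflection blocks with one loop over seven literal index-permutation tables, each image built by copy-and-overwrite directly from trial_board and deduplicated on the fly; Pre_ excludes only boards shorter than 9 cells, on which A raises IndexError.
import Mathlib
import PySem

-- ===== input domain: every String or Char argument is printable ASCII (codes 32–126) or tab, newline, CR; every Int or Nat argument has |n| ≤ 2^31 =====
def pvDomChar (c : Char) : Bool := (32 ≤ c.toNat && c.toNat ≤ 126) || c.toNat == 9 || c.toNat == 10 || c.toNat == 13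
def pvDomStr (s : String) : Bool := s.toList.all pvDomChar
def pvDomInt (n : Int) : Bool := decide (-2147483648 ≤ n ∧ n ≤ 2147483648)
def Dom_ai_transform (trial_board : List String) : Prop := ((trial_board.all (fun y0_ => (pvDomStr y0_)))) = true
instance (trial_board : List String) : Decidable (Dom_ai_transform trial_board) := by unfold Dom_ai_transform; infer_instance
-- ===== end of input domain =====

-- B replaces A's cumulative rotate chain and four unrolled reflection blocks with one
-- dedup loop over seven literal index-permutation tables, each image built by
-- copy-and-overwrite from trial_board (objective: simpler).

-- ===== PORT A =====
-- cell reads use getD with a "" default; Pre_ guarantees every index is in range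
-- (on boards shorter than 9 the Python raises IndexError, excluded by Pre_)
def pyNormStep (acc : List String) (i : Nat) : List String :=
  if acc.getD i "" ≠ "X" then acc.set i (PySem.Int.toStr (Int.ofNat i)) else acc

-- the normalization loop "for i in range(9): if b[i]!='X': b[i]=str(i)" shared by A's blocks
def pyNorm (b : List String) : List String :=
  (List.range 9).foldl pyNormStep b

def aiRotStep (trial temp : List String) : List String :=
  ((((((((trial.set 0 (temp.getD 6 "")).set 1 (temp.getD 3 "")).set 2 (temp.getD 0 "")).set 3
      (temp.getD 7 "")).set 5 (temp.getD 1 "")).set 6 (temp.getD 8 "")).set 7 (temp.getD 5 "")).set 8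
      (temp.getD 2 ""))

def ai_transform_rotate (trial : List String) : List (List String) :=
  ((List.range 3).foldl (fun st _ =>
      let temp := pyNorm (aiRotStep trial st.2)
      (st.1 ++ [temp], temp)) (([] : List (List String)), trial)).1

def aiRefl1 (t : List String) : List String :=
  pyNorm ((((((t.set 0 (t.getD 6 "")).set 1 (t.getD 7 "")).set 2 (t.getD 8 "")).set 6
    (t.getD 0 "")).set 7 (t.getD 1 "")).set 8 (t.getD 2 ""))
def aiRefl2 (t : List String) : List String :=
  pyNorm ((((((t.set 0 (t.getD 2 "")).set 2 (t.getD 0 "")).set 3 (t.getD 5 "")).set 5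
    (t.getD 3 "")).set 6 (t.getD 8 "")).set 8 (t.getD 6 ""))
def aiRefl3 (t : List String) : List String :=
  pyNorm ((((((t.set 1 (t.getD 3 "")).set 3 (t.getD 1 "")).set 5 (t.getD 7 "")).set 7
    (t.getD 5 "")).set 2 (t.getD 6 "")).set 6 (t.getD 2 ""))
def aiRefl4 (t : List String) : List String :=
  pyNorm ((((((t.set 0 (t.getD 8 "")).set 8 (t.getD 0 "")).set 1 (t.getD 5 "")).set 5
    (t.getD 1 "")).set 3 (t.getD 7 "")).set 7 (t.getD 3 ""))

def ai_transform_reflect (t : List String) : List (List String) :=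
  [aiRefl1 t, aiRefl2 t, aiRefl3 t, aiRefl4 t]

def ai_transform (trial_board : List String) : List (List String) :=
  (ai_transform_reflect trial_board).foldl
      (fun acc i => if i ∈ acc then acc else acc ++ [i])
      ((ai_transform_rotate trial_board).foldl
        (fun acc i => if i ∈ acc then acc else acc ++ [i]) [trial_board])

-- ===== PORT B =====
def permsB : List (List Nat) :=
  [[6, 3, 0, 7, 4, 1, 8, 5, 2],
   [8, 7, 6, 5, 4, 3, 2, 1, 0],
   [2, 5, 8, 1, 4, 7, 0, 3, 6],
   [6, 7, 8, 3, 4, 5, 0, 1, 2],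
   [2, 1, 0, 5, 4, 3, 8, 7, 6],
   [0, 3, 6, 1, 4, 7, 2, 5, 8],
   [8, 5, 2, 7, 4, 1, 6, 3, 0]]

-- "img = trial_board[:]; for j, src in enumerate(p): img[j] = ..."; the enumerate
-- index is a nonnegative Int, so .toNat is exact here
def permImg (t : List String) (p : List Nat) : List String :=
  (PySem.List.enumerate p 0).foldl
    (fun img js =>
      img.set js.1.toNat (if t.getD js.2 "" = "X" then "X" else PySem.Int.toStr js.1)) t

def ai_transform_alt (trial_board : List String) : List (List String) :=
  permsB.foldl (fun acc p =>
      let img := permImg trial_board p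
      if img ∈ acc then acc else acc ++ [img]) [trial_board]

-- ===== PRECONDITION & SPEC =====
-- Pre_ excludes boards with fewer than 9 cells, on which the Python A raises IndexError.
def Pre_ai_transform (trial_board : List String) : Prop := 9 ≤ trial_board.length
instance (trial_board : List String) : Decidable (Pre_ai_transform trial_board) := by
  unfold Pre_ai_transform; infer_instance
def pvWitness_ai_transform : List String :=
  ["X", "1", "2", "X", "4", "5", "6", "7", "X"]

def Spec_ai_transform (trial_board : List String) (out : List (List String)) : Prop := out = ai_transform_alt trial_board
instance (trial_board : List String) (out : List (List String)) : Decidable (Spec_ai_transform trial_board out) := by unfold Spec_ai_transform; infer_instance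

-- ===== CLAIM (what is proved, stated in full; the proofs are below) =====
def Claim_equal_ai_transform : Prop := ∀ (trial_board : List String), Dom_ai_transform trial_board → Pre_ai_transform trial_board → Spec_ai_transform trial_board (ai_transform trial_board)

-- ===== LEMMAS AND PROOFS =====
theorem tS0 : PySem.Int.toStr ((0 : Int)) = "0" := by decide
theorem tS1 : PySem.Int.toStr ((1 : Int)) = "1" := by decide
theorem tS2 : PySem.Int.toStr ((2 : Int)) = "2" := by decide
theorem tS3 : PySem.Int.toStr ((3 : Int)) = "3" := by decide
theorem tS4 : PySem.Int.toStr ((4 : Int)) = "4" := by decide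
theorem tS5 : PySem.Int.toStr ((5 : Int)) = "5" := by decide
theorem tS6 : PySem.Int.toStr ((6 : Int)) = "6" := by decide
theorem tS7 : PySem.Int.toStr ((7 : Int)) = "7" := by decide
theorem tS8 : PySem.Int.toStr ((8 : Int)) = "8" := by decide

-- (if c then "X" else s) = "X" decides c whenever s is visibly not "X"
theorem condX2 (c : Prop) [Decidable c] (s : String) (h : s ≠ "X") :
    ((if c then ("X" : String) else s) = "X") ↔ c := by
  split_ifs with hc <;> simp_all

theorem st0 (b0 b1 b2 b3 b4 b5 b6 b7 b8 : String) (r : List String) :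
    pyNormStep (b0 :: b1 :: b2 :: b3 :: b4 :: b5 :: b6 :: b7 :: b8 :: r) 0 = (if b0 = "X" then "X" else "0") :: b1 :: b2 :: b3 :: b4 :: b5 :: b6 :: b7 :: b8 :: r := by
  by_cases h : b0 = "X" <;> simp [pyNormStep, h, tS0]

theorem st1 (b0 b1 b2 b3 b4 b5 b6 b7 b8 : String) (r : List String) :
    pyNormStep (b0 :: b1 :: b2 :: b3 :: b4 :: b5 :: b6 :: b7 :: b8 :: r) 1 = b0 :: (if b1 = "X" then "X" else "1") :: b2 :: b3 :: b4 :: b5 :: b6 :: b7 :: b8 :: r := by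
  by_cases h : b1 = "X" <;> simp [pyNormStep, h, tS1]

theorem st2 (b0 b1 b2 b3 b4 b5 b6 b7 b8 : String) (r : List String) :
    pyNormStep (b0 :: b1 :: b2 :: b3 :: b4 :: b5 :: b6 :: b7 :: b8 :: r) 2 = b0 :: b1 :: (if b2 = "X" then "X" else "2") :: b3 :: b4 :: b5 :: b6 :: b7 :: b8 :: r := by
  by_cases h : b2 = "X" <;> simp [pyNormStep, h, tS2]

theorem st3 (b0 b1 b2 b3 b4 b5 b6 b7 b8 : String) (r : List String) :
    pyNormStep (b0 :: b1 :: b2 :: b3 :: b4 :: b5 :: b6 :: b7 :: b8 :: r) 3 = b0 :: b1 :: b2 :: (if b3 = "X" then "X" else "3") :: b4 :: b5 :: b6 :: b7 :: b8 :: r := by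
  by_cases h : b3 = "X" <;> simp [pyNormStep, h, tS3]

theorem st4 (b0 b1 b2 b3 b4 b5 b6 b7 b8 : String) (r : List String) :
    pyNormStep (b0 :: b1 :: b2 :: b3 :: b4 :: b5 :: b6 :: b7 :: b8 :: r) 4 = b0 :: b1 :: b2 :: b3 :: (if b4 = "X" then "X" else "4") :: b5 :: b6 :: b7 :: b8 :: r := by
  by_cases h : b4 = "X" <;> simp [pyNormStep, h, tS4]

theorem st5 (b0 b1 b2 b3 b4 b5 b6 b7 b8 : String) (r : List String) :
    pyNormStep (b0 :: b1 :: b2 :: b3 :: b4 :: b5 :: b6 :: b7 :: b8 :: r) 5 = b0 :: b1 :: b2 :: b3 :: b4 :: (if b5 = "X" then "X" else "5") :: b6 :: b7 :: b8 :: r := by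
  by_cases h : b5 = "X" <;> simp [pyNormStep, h, tS5]

theorem st6 (b0 b1 b2 b3 b4 b5 b6 b7 b8 : String) (r : List String) :
    pyNormStep (b0 :: b1 :: b2 :: b3 :: b4 :: b5 :: b6 :: b7 :: b8 :: r) 6 = b0 :: b1 :: b2 :: b3 :: b4 :: b5 :: (if b6 = "X" then "X" else "6") :: b7 :: b8 :: r := by
  by_cases h : b6 = "X" <;> simp [pyNormStep, h, tS6]

theorem st7 (b0 b1 b2 b3 b4 b5 b6 b7 b8 : String) (r : List String) :
    pyNormStep (b0 :: b1 :: b2 :: b3 :: b4 :: b5 :: b6 :: b7 :: b8 :: r) 7 = b0 :: b1 :: b2 :: b3 :: b4 :: b5 :: b6 :: (if b7 = "X" then "X" else "7") :: b8 :: r := by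
  by_cases h : b7 = "X" <;> simp [pyNormStep, h, tS7]

theorem st8 (b0 b1 b2 b3 b4 b5 b6 b7 b8 : String) (r : List String) :
    pyNormStep (b0 :: b1 :: b2 :: b3 :: b4 :: b5 :: b6 :: b7 :: b8 :: r) 8 = b0 :: b1 :: b2 :: b3 :: b4 :: b5 :: b6 :: b7 :: (if b8 = "X" then "X" else "8") :: r := by
  by_cases h : b8 = "X" <;> simp [pyNormStep, h, tS8]

theorem pyNorm_cells (a0 a1 a2 a3 a4 a5 a6 a7 a8 : String) (r : List String) :
    pyNorm (a0::a1::a2::a3::a4::a5::a6::a7::a8::r) = (if a0 = "X" then "X" else "0") :: (if a1 = "X" then "X" else "1") :: (if a2 = "X" then "X" else "2") :: (if a3 = "X" then "X" else "3") :: (if a4 = "X" then "X" else "4") :: (if a5 = "X" then "X" else "5") :: (if a6 = "X" then "X" else "6") :: (if a7 = "X" then "X" else "7") :: (if a8 = "X" then "X" else "8") :: r := by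
  rw [pyNorm, show List.range 9 = [0,1,2,3,4,5,6,7,8] from rfl]
  simp only [List.foldl_cons, List.foldl_nil, st0, st1, st2, st3, st4, st5, st6, st7, st8]

-- ===== VERDICT (by name: the statement is the Claim_ definition above) =====
theorem ai_transform_spec : Claim_equal_ai_transform := by
  intro t _ pre
  unfold Pre_ai_transform at pre
  obtain ⟨x0, x1, x2, x3, x4, x5, x6, x7, x8, r, rfl⟩ :
      ∃ x0 x1 x2 x3 x4 x5 x6 x7 x8 r,
        t = x0 :: x1 :: x2 :: x3 :: x4 :: x5 :: x6 :: x7 :: x8 :: r := by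
    match t, pre with
    | x0 :: x1 :: x2 :: x3 :: x4 :: x5 :: x6 :: x7 :: x8 :: r, _ =>
      exact ⟨_, _, _, _, _, _, _, _, _, _, rfl⟩
  show ai_transform _ = ai_transform_alt _
  have hrot : ai_transform_rotate (x0 :: x1 :: x2 :: x3 :: x4 :: x5 :: x6 :: x7 :: x8 :: r) =
      [((if x6 = "X" then "X" else "0") :: (if x3 = "X" then "X" else "1") :: (if x0 = "X" then "X" else "2") :: (if x7 = "X" then "X" else "3") :: (if x4 = "X" then "X" else "4") :: (if x1 = "X" then "X" else "5") :: (if x8 = "X" then "X" else "6") :: (if x5 = "X" then "X" else "7") :: (if x2 = "X" then "X" else "8") :: r),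
        ((if x8 = "X" then "X" else "0") :: (if x7 = "X" then "X" else "1") :: (if x6 = "X" then "X" else "2") :: (if x5 = "X" then "X" else "3") :: (if x4 = "X" then "X" else "4") :: (if x3 = "X" then "X" else "5") :: (if x2 = "X" then "X" else "6") :: (if x1 = "X" then "X" else "7") :: (if x0 = "X" then "X" else "8") :: r),
        ((if x2 = "X" then "X" else "0") :: (if x5 = "X" then "X" else "1") :: (if x8 = "X" then "X" else "2") :: (if x1 = "X" then "X" else "3") :: (if x4 = "X" then "X" else "4") :: (if x7 = "X" then "X" else "5") :: (if x0 = "X" then "X" else "6") :: (if x3 = "X" then "X" else "7") :: (if x6 = "X" then "X" else "8") :: r)] := by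
    rw [ai_transform_rotate, show List.range 3 = [0,1,2] from rfl]
    simp only [List.foldl_cons, List.foldl_nil, aiRotStep,
      List.set_cons_zero, List.set_cons_succ, List.getD_cons_zero, List.getD_cons_succ,
      pyNorm_cells, condX2, ne_eq, String.reduceEq,
      not_false_eq_true, List.nil_append, List.cons_append]
  have hrefl : ai_transform_reflect (x0 :: x1 :: x2 :: x3 :: x4 :: x5 :: x6 :: x7 :: x8 :: r) =
      [((if x6 = "X" then "X" else "0") :: (if x7 = "X" then "X" else "1") :: (if x8 = "X" then "X" else "2") :: (if x3 = "X" then "X" else "3") :: (if x4 = "X" then "X" else "4") :: (if x5 = "X" then "X" else "5") :: (if x0 = "X" then "X" else "6") :: (if x1 = "X" then "X" else "7") :: (if x2 = "X" then "X" else "8") :: r),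
        ((if x2 = "X" then "X" else "0") :: (if x1 = "X" then "X" else "1") :: (if x0 = "X" then "X" else "2") :: (if x5 = "X" then "X" else "3") :: (if x4 = "X" then "X" else "4") :: (if x3 = "X" then "X" else "5") :: (if x8 = "X" then "X" else "6") :: (if x7 = "X" then "X" else "7") :: (if x6 = "X" then "X" else "8") :: r),
        ((if x0 = "X" then "X" else "0") :: (if x3 = "X" then "X" else "1") :: (if x6 = "X" then "X" else "2") :: (if x1 = "X" then "X" else "3") :: (if x4 = "X" then "X" else "4") :: (if x7 = "X" then "X" else "5") :: (if x2 = "X" then "X" else "6") :: (if x5 = "X" then "X" else "7") :: (if x8 = "X" then "X" else "8") :: r),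
        ((if x8 = "X" then "X" else "0") :: (if x5 = "X" then "X" else "1") :: (if x2 = "X" then "X" else "2") :: (if x7 = "X" then "X" else "3") :: (if x4 = "X" then "X" else "4") :: (if x1 = "X" then "X" else "5") :: (if x6 = "X" then "X" else "6") :: (if x3 = "X" then "X" else "7") :: (if x0 = "X" then "X" else "8") :: r)] := by
    simp only [ai_transform_reflect, aiRefl1, aiRefl2, aiRefl3, aiRefl4,
      List.set_cons_zero, List.set_cons_succ, List.getD_cons_zero, List.getD_cons_succ,
      pyNorm_cells]
  have hmap : permsB.map (permImg (x0 :: x1 :: x2 :: x3 :: x4 :: x5 :: x6 :: x7 :: x8 :: r)) =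
      [((if x6 = "X" then "X" else "0") :: (if x3 = "X" then "X" else "1") :: (if x0 = "X" then "X" else "2") :: (if x7 = "X" then "X" else "3") :: (if x4 = "X" then "X" else "4") :: (if x1 = "X" then "X" else "5") :: (if x8 = "X" then "X" else "6") :: (if x5 = "X" then "X" else "7") :: (if x2 = "X" then "X" else "8") :: r),
        ((if x8 = "X" then "X" else "0") :: (if x7 = "X" then "X" else "1") :: (if x6 = "X" then "X" else "2") :: (if x5 = "X" then "X" else "3") :: (if x4 = "X" then "X" else "4") :: (if x3 = "X" then "X" else "5") :: (if x2 = "X" then "X" else "6") :: (if x1 = "X" then "X" else "7") :: (if x0 = "X" then "X" else "8") :: r),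
        ((if x2 = "X" then "X" else "0") :: (if x5 = "X" then "X" else "1") :: (if x8 = "X" then "X" else "2") :: (if x1 = "X" then "X" else "3") :: (if x4 = "X" then "X" else "4") :: (if x7 = "X" then "X" else "5") :: (if x0 = "X" then "X" else "6") :: (if x3 = "X" then "X" else "7") :: (if x6 = "X" then "X" else "8") :: r),
        ((if x6 = "X" then "X" else "0") :: (if x7 = "X" then "X" else "1") :: (if x8 = "X" then "X" else "2") :: (if x3 = "X" then "X" else "3") :: (if x4 = "X" then "X" else "4") :: (if x5 = "X" then "X" else "5") :: (if x0 = "X" then "X" else "6") :: (if x1 = "X" then "X" else "7") :: (if x2 = "X" then "X" else "8") :: r),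
        ((if x2 = "X" then "X" else "0") :: (if x1 = "X" then "X" else "1") :: (if x0 = "X" then "X" else "2") :: (if x5 = "X" then "X" else "3") :: (if x4 = "X" then "X" else "4") :: (if x3 = "X" then "X" else "5") :: (if x8 = "X" then "X" else "6") :: (if x7 = "X" then "X" else "7") :: (if x6 = "X" then "X" else "8") :: r),
        ((if x0 = "X" then "X" else "0") :: (if x3 = "X" then "X" else "1") :: (if x6 = "X" then "X" else "2") :: (if x1 = "X" then "X" else "3") :: (if x4 = "X" then "X" else "4") :: (if x7 = "X" then "X" else "5") :: (if x2 = "X" then "X" else "6") :: (if x5 = "X" then "X" else "7") :: (if x8 = "X" then "X" else "8") :: r),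
        ((if x8 = "X" then "X" else "0") :: (if x5 = "X" then "X" else "1") :: (if x2 = "X" then "X" else "2") :: (if x7 = "X" then "X" else "3") :: (if x4 = "X" then "X" else "4") :: (if x1 = "X" then "X" else "5") :: (if x6 = "X" then "X" else "6") :: (if x3 = "X" then "X" else "7") :: (if x0 = "X" then "X" else "8") :: r)] := by
    simp only [permsB, List.map_cons, List.map_nil, permImg,
      PySem.List.enumerate_cons, PySem.List.enumerate_nil,
      List.foldl_cons, List.foldl_nil,
      List.getD_cons_zero, List.getD_cons_succ, tS0]
    simp [tS1, tS2, tS3, tS4, tS5, tS6, tS7, tS8]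
  have hB : ai_transform_alt (x0 :: x1 :: x2 :: x3 :: x4 :: x5 :: x6 :: x7 :: x8 :: r) =
      (permsB.map (permImg (x0 :: x1 :: x2 :: x3 :: x4 :: x5 :: x6 :: x7 :: x8 :: r))).foldl
        (fun acc i => if i ∈ acc then acc else acc ++ [i]) [x0 :: x1 :: x2 :: x3 :: x4 :: x5 :: x6 :: x7 :: x8 :: r] := by
    rw [List.foldl_map]
    rfl
  rw [ai_transform, hrot, hrefl, hB, hmap, ← List.foldl_append]
  rfl
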